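-- pv_equiv track=rewrite | github.com/dlt-hub/dlt | tools/check_api_breaking.py | classify_griffe_output
-- ===== SOURCE A (Python) =====
-- from typing import Dict, List, Set, Tuple
--
-- def classify_griffe_output(output: str, source_files: Set[str]) -> Tuple[List[str], List[str]]:
--     """Classify griffe output lines into public API hits and pruned lines.
--
--     Args:
--         output (str): Raw griffe stdout+stderr combined.
--         source_files (Set[str]): Relative file paths of public API modules.
--
--     Returns:
--         Tuple[List[str], List[str]]: (kept, pruned) lists of issue lines.
--     """
--     kept: List[str] = []
--     pruned: List[str] = []
--
--     for line in output.splitlines():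
--         line = line.strip()
--         if not line or line.startswith("warning:"):
--             continue
--         # griffe output format: "path/to/file.py:LINE: message"
--         if any(line.startswith(prefix) for prefix in source_files):
--             kept.append(line)
--         else:
--             pruned.append(line)
--
--     return kept, pruned
-- ===== SOURCE B (Python) =====
-- from typing import Dict, List, Set, Tuple
--
--
-- def classify_griffe_output(output: str, source_files: Set[str]) -> Tuple[List[str], List[str]]:
--     """Classify griffe output lines into public API hits and pruned lines.
--
--     Staged-pass version: first clean the lines, then partition them by
--     looking up each prefix of the line in the source_files set.
--     """
--     lines = [l for l in (raw.strip() for raw in output.splitlines())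
--              if l and not l.startswith("warning:")]
--
--     def hit(line: str) -> bool:
--         return any(line[:k] in source_files for k in range(len(line) + 1))
--
--     return [l for l in lines if hit(l)], [l for l in lines if not hit(l)]
-- ===== Notes on version B (the rewrite author's own statement) =====
-- stated objective: alternative
-- what changed: B is restructured into staged passes: it first builds the cleaned line list, then partitions it with two filters whose test looks up each prefix of the line in the source_files set, instead of A's single accumulator loop that tests startswith against every source file per line.
import Mathlib
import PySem

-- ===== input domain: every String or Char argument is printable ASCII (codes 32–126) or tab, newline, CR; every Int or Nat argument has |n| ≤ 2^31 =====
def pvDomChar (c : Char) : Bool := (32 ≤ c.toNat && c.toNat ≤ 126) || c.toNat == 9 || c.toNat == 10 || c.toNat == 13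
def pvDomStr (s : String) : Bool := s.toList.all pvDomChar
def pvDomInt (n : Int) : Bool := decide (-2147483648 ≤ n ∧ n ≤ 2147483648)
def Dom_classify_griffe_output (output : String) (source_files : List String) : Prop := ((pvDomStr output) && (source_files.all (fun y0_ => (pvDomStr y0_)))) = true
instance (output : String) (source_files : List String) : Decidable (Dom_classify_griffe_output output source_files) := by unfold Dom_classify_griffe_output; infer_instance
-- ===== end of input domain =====

-- B restructures A into staged passes: build the cleaned line list once, then partition it with
-- two filters whose test looks up each prefix of the line in the set (return value proved identical).


-- ===== PORT A =====
-- literal port of A: fold over the lines, per line test startswith against every source file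
def classify_griffe_output (output : String) (source_files : List String) : List String × List String :=
  (PySem.Str.splitlines output).foldl
    (fun acc raw =>
      let line := PySem.Str.strip raw
      if line = "" ∨ PySem.Str.startswith line "warning:" then acc
      else if source_files.any (fun pre => PySem.Str.startswith line pre) then
        (acc.1 ++ [line], acc.2)
      else
        (acc.1, acc.2 ++ [line]))
    ([], [])

-- ===== PORT B =====
-- B's membership test: some prefix line[:k] of the line is in the source_files set
def cgHit (source_files : List String) (line : String) : Bool :=
  (List.range (line.toList.length + 1)).any
    (fun k => source_files.contains (PySem.Str.slice line none (some (k : Int))))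

-- literal port of B: staged passes — clean the lines first, then partition them with two filters
def classify_griffe_output_alt (output : String) (source_files : List String) : List String × List String :=
  let lines := ((PySem.Str.splitlines output).map PySem.Str.strip).filter
      (fun l => !(l == "" || PySem.Str.startswith l "warning:"))
  (lines.filter (cgHit source_files), lines.filter (fun l => !cgHit source_files l))

-- ===== PRECONDITION & SPEC =====
def Spec_classify_griffe_output (output : String) (source_files : List String) (out : List String × List String) : Prop := out = classify_griffe_output_alt output source_files
instance (output : String) (source_files : List String) (out : List String × List String) : Decidable (Spec_classify_griffe_output output source_files out) := by unfold Spec_classify_griffe_output; infer_instance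

-- ===== CLAIM =====
def Claim_equal_classify_griffe_output : Prop := ∀ (output : String) (source_files : List String), Dom_classify_griffe_output output source_files → Spec_classify_griffe_output output source_files (classify_griffe_output output source_files)

-- ===== LEMMAS AND PROOFS =====

-- some source file is a prefix of the line  ⟺  some prefix of the line is in the set
lemma any_startswith_eq_cgHit (line : String) (fs : List String) :
    fs.any (fun pre => PySem.Str.startswith line pre) = cgHit fs line := by
  unfold cgHit
  simp only [List.any_eq, List.contains_eq_mem, PySem.Str.startswith_eq,
    List.mem_range, decide_eq_decide, decide_eq_true_eq]
  constructor
  · rintro ⟨p, hp, hsw⟩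
    rw [PySem.Chars.startswith_iff] at hsw
    refine ⟨p.toList.length, by have := hsw.length_le; omega, ?_⟩
    have hslice : PySem.Str.slice line none (some ((p.toList.length : Nat) : Int)) = p := by
      apply String.toList_injective
      rw [PySem.Str.toList_slice, PySem.Chars.slice_eq_listSlice,
        PySem.List.slice_to_natCast]
      exact (List.prefix_iff_eq_take.mp hsw).symm
    rw [hslice]; exact hp
  · rintro ⟨k, _, hmem⟩
    refine ⟨_, hmem, ?_⟩
    rw [PySem.Chars.startswith_iff, PySem.Str.toList_slice,
      PySem.Chars.slice_eq_listSlice, PySem.List.slice_to_natCast]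
    exact List.take_prefix k line.toList

-- A's accumulator loop computes the two filters of the cleaned line list
lemma foldA_eq_filters (fs : List String) (raws : List String) (a b : List String) :
    raws.foldl
      (fun acc raw =>
        let line := PySem.Str.strip raw
        if line = "" ∨ PySem.Str.startswith line "warning:" then acc
        else if fs.any (fun pre => PySem.Str.startswith line pre) then
          (acc.1 ++ [line], acc.2)
        else
          (acc.1, acc.2 ++ [line]))
      (a, b)
    = (a ++ ((raws.map PySem.Str.strip).filter
          (fun l => !(l == "" || PySem.Str.startswith l "warning:"))).filter (cgHit fs),
       b ++ ((raws.map PySem.Str.strip).filter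
          (fun l => !(l == "" || PySem.Str.startswith l "warning:"))).filter
            (fun l => !cgHit fs l)) := by
  induction raws generalizing a b with
  | nil => simp
  | cons raw rest ih =>
    simp only [List.foldl_cons, List.map_cons]
    by_cases hskip : PySem.Str.strip raw = "" ∨ PySem.Str.startswith (PySem.Str.strip raw) "warning:"
    · have hb : (PySem.Str.strip raw == "" || PySem.Str.startswith (PySem.Str.strip raw) "warning:") = true := by
        rcases hskip with h | h
        · simp [h]
        · rw [h, Bool.or_true]
      rw [if_pos hskip, List.filter_cons]
      simp only [hb, Bool.not_true, if_neg Bool.false_ne_true]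
      exact ih a b
    · rw [not_or] at hskip
      have hb : (PySem.Str.strip raw == "" || PySem.Str.startswith (PySem.Str.strip raw) "warning:") = false := by
        simp only [Bool.or_eq_false_iff]
        exact ⟨by simpa using hskip.1, by simpa using hskip.2⟩
      rw [if_neg (by rw [not_or]; exact hskip), List.filter_cons]
      simp only [hb, Bool.not_false]
      rw [any_startswith_eq_cgHit]
      by_cases hhit : cgHit fs (PySem.Str.strip raw) = true
      · simp only [hhit, if_pos rfl, if_neg Bool.false_ne_true]
        rw [ih]
        simp [List.filter_cons, hhit, List.filter_filter]
      · have hhit' : cgHit fs (PySem.Str.strip raw) = false := by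
          cases h : cgHit fs (PySem.Str.strip raw) <;> simp_all
        simp only [hhit', if_pos rfl, if_neg Bool.false_ne_true]
        rw [ih]
        simp [List.filter_cons, hhit', List.filter_filter]

-- ===== VERDICT =====
theorem classify_griffe_output_spec : Claim_equal_classify_griffe_output := by
  intro output source_files _
  unfold Spec_classify_griffe_output classify_griffe_output classify_griffe_output_alt
  rw [foldA_eq_filters]
  simp
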